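-- pv_equiv track=rewrite | github.com/BenjiSomur/configuration | dotconfig/Code/User/History/-130df211/SvDX.py | extract_omnis
-- ===== SOURCE A (Python) =====
-- from copy import deepcopy
--
-- def extract_omnis(omnis, chrom):
--     _aux = deepcopy(chrom)
--     origs = []
--     for nmod in omnis:
--         for idx in range(len(_aux)):
--             if nmod in _aux[idx]:
--                 origs.append((nmod, idx))
--                 _aux[idx].pop(_aux[idx].index(nmod))
--                 break
--     aux2 = remempt(_aux)
--     return (aux2, origs)
--
-- def remempt(chrom):
--     aux = list()
--     for clus in chrom:
--         if len(clus) == 0: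
--             continue
--         aux.append(deepcopy(clus))
--     return aux
-- ===== SOURCE B (Python) =====
-- def extract_omnis(omnis, chrom):
--     # Index every occurrence once (value -> queue of (cluster, position) in scan
--     # order), answer each query by popping the earliest remaining occurrence,
--     # then rebuild the clusters skipping the removed positions.
--     occ = {}
--     for ci, clus in enumerate(chrom):
--         for pos, v in enumerate(clus):
--             occ.setdefault(v, []).append((ci, pos))
--     removed = set()
--     origs = []
--     for nmod in omnis:
--         lst = occ.get(nmod)
--         if lst:
--             ci, pos = lst.pop(0)
--             origs.append((nmod, ci))
--             removed.add((ci, pos))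
--     aux2 = []
--     for ci, clus in enumerate(chrom):
--         rest = [v for pos, v in enumerate(clus) if (ci, pos) not in removed]
--         if rest:
--             aux2.append(rest)
--     return (aux2, origs)
-- ===== Notes on version B (the rewrite author's own statement) =====
-- stated objective: faster
-- what changed: B builds a one-pass occurrence index (value -> queue of (cluster,position) in scan order) and answers each query by popping the earliest remaining occurrence into a removed-position set, then rebuilds the clusters in one final pass, instead of rescanning every cluster (with membership tests and list.index) for each queried value.
import Mathlib
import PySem

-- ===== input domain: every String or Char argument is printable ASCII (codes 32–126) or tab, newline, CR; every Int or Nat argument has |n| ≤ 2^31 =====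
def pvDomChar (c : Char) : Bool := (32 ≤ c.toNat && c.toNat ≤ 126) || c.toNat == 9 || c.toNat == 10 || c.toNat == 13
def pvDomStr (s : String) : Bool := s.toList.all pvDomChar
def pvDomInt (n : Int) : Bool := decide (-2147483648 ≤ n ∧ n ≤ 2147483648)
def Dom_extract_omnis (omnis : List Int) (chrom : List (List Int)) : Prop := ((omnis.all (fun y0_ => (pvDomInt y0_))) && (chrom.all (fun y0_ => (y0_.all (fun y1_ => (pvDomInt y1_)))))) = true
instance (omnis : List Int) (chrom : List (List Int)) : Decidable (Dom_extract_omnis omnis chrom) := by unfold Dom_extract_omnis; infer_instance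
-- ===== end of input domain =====

-- B replaces A's per-query rescan of all clusters with a one-pass occurrence
-- index (value -> queue of (cluster, position)) plus a removed-position set;
-- same return value by a different algorithm.

-- ===== PORT A =====
-- _aux[idx].pop(_aux[idx].index(nmod))
def pyPopFirst (clus : List Int) (nmod : Int) : List Int :=
  match PySem.List.index? clus nmod with
  | some i =>
      match PySem.List.pop? clus (i : Int) with
      | some r => r.2
      | none => clus
  | none => clus

-- the inner 'for idx in range(len(_aux)): if nmod in _aux[idx]: …; break'
def innerA (nmod : Int) (idx : Int) : List (List Int) → Option Int × List (List Int)
  | [] => (none, [])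
  | clus :: rest =>
      if nmod ∈ clus then (some idx, pyPopFirst clus nmod :: rest)
      else
        let r := innerA nmod (idx + 1) rest
        (r.1, clus :: r.2)

def remempt (chrom : List (List Int)) : List (List Int) :=
  chrom.foldl (fun aux clus => if clus.length = 0 then aux else aux ++ [clus]) []

def extract_omnis (omnis : List Int) (chrom : List (List Int)) : List (List Int) × (List (Int × Int)) :=
  let s := omnis.foldl
    (fun (st : List (List Int) × List (Int × Int)) nmod =>
      match innerA nmod 0 st.1 with
      | (some idx, aux) => (aux, st.2 ++ [(nmod, idx)])
      | (none, aux) => (aux, st.2))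
    (chrom, [])
  (remempt s.1, s.2)

-- ===== PORT B =====
def extract_omnis_alt (omnis : List Int) (chrom : List (List Int)) : List (List Int) × (List (Int × Int)) :=
  -- occ: value -> list of (cluster index, position) in scan order
  let occ : PySem.Dict Int (List (Int × Int)) :=
    (PySem.List.enumerate chrom 0).foldl (fun occ p =>
      (PySem.List.enumerate p.2 0).foldl (fun occ q =>
        occ.modify q.2 [] (fun l => l ++ [(p.1, q.1)])) occ) PySem.Dict.empty
  -- pop the earliest remaining occurrence of each queried value
  let s := omnis.foldl
    (fun (st : PySem.Dict Int (List (Int × Int)) × PySem.Set (Int × Int) × List (Int × Int)) nmod =>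
      match st.1.get? nmod with
      | some ((ci, pos) :: rest) =>
          (st.1.insert nmod rest, PySem.Set.add st.2.1 (ci, pos), st.2.2 ++ [(nmod, ci)])
      | _ => st)
    (occ, PySem.Set.empty, [])
  -- rebuild, skipping removed positions and empty clusters
  let aux2 := (PySem.List.enumerate chrom 0).foldl (fun aux2 p =>
      let rest := ((PySem.List.enumerate p.2 0).filter
          (fun q => !(PySem.Set.contains s.2.1 (p.1, q.1)))).map (·.2)
      if rest = [] then aux2 else aux2 ++ [rest]) []
  (aux2, s.2.2)

-- ===== PRECONDITION & SPEC =====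
def Spec_extract_omnis (omnis : List Int) (chrom : List (List Int)) (out : List (List Int) × (List (Int × Int))) : Prop := out = extract_omnis_alt omnis chrom
instance (omnis : List Int) (chrom : List (List Int)) (out : List (List Int) × (List (Int × Int))) : Decidable (Spec_extract_omnis omnis chrom out) := by unfold Spec_extract_omnis; infer_instance

-- ===== CLAIM (what is proved, stated in full; the proofs are below) =====
def Claim_equal_extract_omnis : Prop := ∀ (omnis : List Int) (chrom : List (List Int)), Dom_extract_omnis omnis chrom → Spec_extract_omnis omnis chrom (extract_omnis omnis chrom)

-- ===== LEMMAS AND PROOFS =====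

-- proof-side model: positions (as Ints) of v in a cluster, scanning from 'pos'
def occPos (v : Int) : Int → List Int → List Int
  | _, [] => []
  | pos, x :: xs => if x = v then pos :: occPos v (pos + 1) xs else occPos v (pos + 1) xs

-- all occurrences of v in the chromosome, as (cluster index, position) pairs
def occAll (v : Int) : Int → List (List Int) → List (Int × Int)
  | _, [] => []
  | ci, c :: cs => (occPos v 0 c).map (fun p => (ci, p)) ++ occAll v (ci + 1) cs

-- a cluster with the positions in R deleted
def keepP (R : List (Int × Int)) (ci : Int) : Int → List Int → List Int
  | _, [] => []
  | pos, x :: xs =>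
      if PySem.Set.contains R (ci, pos) then keepP R ci (pos + 1) xs
      else x :: keepP R ci (pos + 1) xs

def mapKeep (R : List (Int × Int)) : Int → List (List Int) → List (List Int)
  | _, [] => []
  | ci, c :: cs => keepP R ci 0 c :: mapKeep R (ci + 1) cs

-- remaining occurrences of v
def remOcc (v : Int) (R : List (Int × Int)) (ci : Int) (chrom : List (List Int)) : List (Int × Int) :=
  (occAll v ci chrom).filter (fun p => !(PySem.Set.contains R p))

-- structural "remove first occurrence"
def eraseF (v : Int) : List Int → List Int
  | [] => []
  | x :: xs => if x = v then xs else x :: eraseF v xs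

theorem contains_iff_mem (R : List (Int × Int)) (q : Int × Int) :
    PySem.Set.contains R q = true ↔ q ∈ R := by
  simp [PySem.Set.contains]

theorem contains_add (R : List (Int × Int)) (a q : Int × Int) :
    PySem.Set.contains (PySem.Set.add R a) q = (PySem.Set.contains R q || q == a) := by
  by_cases h1 : q ∈ R <;> by_cases h2 : q = a <;>
    simp [PySem.Set.contains, PySem.Set.mem_add, h1, h2]

theorem keepP_empty (ci pos : Int) (xs : List Int) : keepP [] ci pos xs = xs := by
  induction xs generalizing pos with
  | nil => rfl
  | cons x xs ih => simp [keepP, PySem.Set.contains, ih]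

theorem mapKeep_empty (ci : Int) (cs : List (List Int)) : mapKeep [] ci cs = cs := by
  induction cs generalizing ci with
  | nil => rfl
  | cons c cs ih => simp [mapKeep, keepP_empty, ih]

theorem occPos_ge (v : Int) (pos q : Int) (xs : List Int) (h : q ∈ occPos v pos xs) :
    pos ≤ q := by
  induction xs generalizing pos with
  | nil => simp [occPos] at h
  | cons x xs ih =>
    by_cases hx : x = v
    · simp [occPos, hx] at h
      rcases h with h | h
      · omega
      · have := ih (pos + 1) h; omega
    · simp [occPos, hx] at h
      have := ih (pos + 1) h; omega

theorem occPos_nodup (v : Int) (pos : Int) (xs : List Int) : (occPos v pos xs).Nodup := by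
  induction xs generalizing pos with
  | nil => simp [occPos]
  | cons x xs ih =>
    by_cases hx : x = v
    · simp [occPos, hx]
      refine ⟨fun h => ?_, ih (pos + 1)⟩
      have := occPos_ge v (pos + 1) pos xs h; omega
    · simpa [occPos, hx] using ih (pos + 1)

theorem occPos_val (v u : Int) (pos q : Int) (xs : List Int)
    (hv : q ∈ occPos v pos xs) (hu : q ∈ occPos u pos xs) : v = u := by
  induction xs generalizing pos with
  | nil => simp [occPos] at hv
  | cons x xs ih =>
    by_cases hx : x = v <;> by_cases hy : x = u
    · omega
    · simp [occPos, hx] at hv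
      simp [occPos, hy] at hu
      have hge := occPos_ge u (pos + 1) q xs hu
      rcases hv with hv | hv
      · omega
      · exact ih (pos + 1) hv hu
    · simp [occPos, hx] at hv
      simp [occPos, hy] at hu
      have hge := occPos_ge v (pos + 1) q xs hv
      rcases hu with hu | hu
      · omega
      · exact ih (pos + 1) hv hu
    · simp [occPos, hx] at hv
      simp [occPos, hy] at hu
      exact ih (pos + 1) hv hu

theorem occAll_fst_ge (v : Int) (ci : Int) (cs : List (List Int)) (q : Int × Int)
    (h : q ∈ occAll v ci cs) : ci ≤ q.1 := by
  induction cs generalizing ci with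
  | nil => simp [occAll] at h
  | cons c cs ih =>
    simp only [occAll, List.mem_append] at h
    rcases h with h | h
    · rcases List.mem_map.1 h with ⟨p, _, rfl⟩; simp
    · have := ih (ci + 1) h; omega

theorem occAll_nodup (v : Int) (ci : Int) (cs : List (List Int)) : (occAll v ci cs).Nodup := by
  induction cs generalizing ci with
  | nil => simp [occAll]
  | cons c cs ih =>
    simp only [occAll]
    refine List.Nodup.append ?_ (ih (ci + 1)) ?_
    · exact (occPos_nodup v 0 c).map (fun a b hab => by simpa using hab)
    · intro q hq hq'
      rcases List.mem_map.1 hq with ⟨p, _, rfl⟩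
      have := occAll_fst_ge v (ci + 1) cs (ci, p) hq'
      simp at this
    
theorem occAll_val (v u : Int) (ci : Int) (cs : List (List Int)) (q : Int × Int)
    (hv : q ∈ occAll v ci cs) (hu : q ∈ occAll u ci cs) : v = u := by
  induction cs generalizing ci with
  | nil => simp [occAll] at hv
  | cons c cs ih =>
    simp only [occAll, List.mem_append] at hv hu
    rcases hv with hv | hv <;> rcases hu with hu | hu
    · rcases List.mem_map.1 hv with ⟨p, hp, rfl⟩
      rcases List.mem_map.1 hu with ⟨p', hp', he⟩
      have : p' = p := by simpa using congrArg Prod.snd he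
      exact occPos_val v u 0 p c hp (this ▸ hp')
    · rcases List.mem_map.1 hv with ⟨p, _, rfl⟩
      have := occAll_fst_ge u (ci + 1) cs (ci, p) hu
      simp at this
    · rcases List.mem_map.1 hu with ⟨p, _, rfl⟩
      have := occAll_fst_ge v (ci + 1) cs (ci, p) hv
      simp at this
    · exact ih (ci + 1) hv hu

-- first-occurrence erase on the survivors = delete one more position
theorem eraseF_of_not_mem (v : Int) (l : List Int) (h : v ∉ l) : eraseF v l = l := by
  induction l with
  | nil => rfl
  | cons x xs ih =>
    simp only [List.mem_cons, not_or] at h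
    simp [eraseF, Ne.symm h.1, ih h.2]

theorem pyPopFirst_of_index (clus : List Int) (v : Int) (i : Nat)
    (hidx : PySem.List.index? clus v = some i) (hi : i < clus.length) :
    pyPopFirst clus v = clus.eraseIdx i := by
  unfold pyPopFirst
  rw [hidx]
  show (match PySem.List.pop? clus (i : Int) with | some r => r.2 | none => clus) = clus.eraseIdx i
  rw [PySem.List.pop?_natCast clus i hi]

theorem pyPopFirst_of_none (clus : List Int) (v : Int)
    (hidx : PySem.List.index? clus v = none) : pyPopFirst clus v = clus := by
  unfold pyPopFirst
  rw [hidx]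

theorem eraseIdx_index? (clus : List Int) (v : Int) (i : Nat)
    (hidx : PySem.List.index? clus v = some i) : clus.eraseIdx i = eraseF v clus := by
  induction clus generalizing i with
  | nil =>
    rw [(PySem.List.index?_eq_none_iff ([] : List Int) v).2 (by simp)] at hidx
    cases hidx
  | cons x xs ih =>
    by_cases hx : x = v
    · subst hx
      rw [PySem.List.index?_cons_self] at hidx
      cases hidx
      simp [eraseF]
    · rw [PySem.List.index?_cons_of_ne xs hx] at hidx
      cases hj : PySem.List.index? xs v with
      | none => rw [hj] at hidx; cases hidx
      | some j =>
        rw [hj] at hidx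
        simp only [Option.map_some, Option.some.injEq] at hidx
        subst hidx
        simp [eraseF, hx, List.eraseIdx_cons_succ, ih j hj]

theorem pyPopFirst_eq_eraseF (clus : List Int) (v : Int) : pyPopFirst clus v = eraseF v clus := by
  cases hidx : PySem.List.index? clus v with
  | none =>
    rw [pyPopFirst_of_none clus v hidx,
      eraseF_of_not_mem v clus ((PySem.List.index?_eq_none_iff clus v).1 hidx)]
  | some i =>
    rcases PySem.List.getElem_of_index?_eq_some hidx with ⟨hi, -, -⟩
    rw [pyPopFirst_of_index clus v i hidx hi, eraseIdx_index? clus v i hidx]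

-- membership in the survivor list
theorem mem_keepP (R : List (Int × Int)) (v : Int) (ci pos : Int) (xs : List Int) :
    v ∈ keepP R ci pos xs ↔ ∃ p ∈ occPos v pos xs, (ci, p) ∉ R := by
  induction xs generalizing pos with
  | nil => simp [keepP, occPos]
  | cons x xs ih =>
    by_cases hx : x = v <;> by_cases hr : (ci, pos) ∈ R
    · simpa [keepP, occPos, hx, hr, PySem.Set.contains] using ih (pos + 1)
    · constructor
      · intro _; exact ⟨pos, by simp [occPos, hx], hr⟩
      · intro _; simp [keepP, hr, hx, PySem.Set.contains]
    · simpa [keepP, occPos, hx, hr, PySem.Set.contains] using ih (pos + 1)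
    · have hvx : ¬ v = x := fun h => hx h.symm
      simpa [keepP, occPos, hx, hr, hvx, PySem.Set.contains] using ih (pos + 1)

theorem keepP_add_out (R : List (Int × Int)) (a : Int × Int) (ci pos : Int) (xs : List Int)
    (h : a.1 ≠ ci ∨ a.2 < pos) :
    keepP (PySem.Set.add R a) ci pos xs = keepP R ci pos xs := by
  induction xs generalizing pos with
  | nil => rfl
  | cons x xs ih =>
    have hne : ((ci, pos) : Int × Int) ≠ a := by
      rcases h with h | h <;> intro he <;> rw [← he] at h <;> simp at h
    have hc : PySem.Set.contains (PySem.Set.add R a) (ci, pos) =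
        PySem.Set.contains R (ci, pos) := by
      rw [contains_add]
      simp [hne]
    have hrec := ih (pos + 1) (by rcases h with h | h; exact Or.inl h; exact Or.inr (by omega))
    simp only [keepP, hc, hrec]

theorem keepP_add_ne (R : List (Int × Int)) (a : Int × Int) (ci pos : Int) (xs : List Int)
    (hne : ci ≠ a.1) :
    keepP (PySem.Set.add R a) ci pos xs = keepP R ci pos xs :=
  keepP_add_out R a ci pos xs (Or.inl (Ne.symm hne))

theorem mapKeep_add_lt (R : List (Int × Int)) (a : Int × Int) (ci : Int) (cs : List (List Int))
    (hlt : a.1 < ci) :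
    mapKeep (PySem.Set.add R a) ci cs = mapKeep R ci cs := by
  induction cs generalizing ci with
  | nil => rfl
  | cons c cs ih =>
    simp only [mapKeep, keepP_add_ne R a ci 0 c (by omega), ih (ci + 1) (by omega)]

-- generic: removing the head of a filter from a nodup list
theorem filter_add_head {α : Type} [DecidableEq α] [BEq α] [LawfulBEq α] (l : List α) (f : α → Bool) (a : α)
    (rest : List α) (hnd : l.Nodup) (h : l.filter f = a :: rest) :
    l.filter (fun x => f x && !(x == a)) = rest := by
  induction hnd generalizing rest with
  | nil => simp at h
  | @cons x xs hxm hnd' ih =>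
    by_cases hf : f x = true
    · rw [List.filter_cons_of_pos hf] at h
      rcases List.cons.injEq .. ▸ h with ⟨rfl, hrest⟩
      rw [List.filter_cons_of_neg (by simp [hf])]
      rw [← hrest]
      exact List.filter_congr (fun y hy => by
        have : y ≠ x := (hxm y hy).symm
        simp [this])
    · rw [List.filter_cons_of_neg (by simp at hf; simp [hf])] at h
      rw [List.filter_cons_of_neg (by simp at hf; simp [hf])]
      exact ih rest h

theorem eraseF_keepP (R : List (Int × Int)) (v : Int) (ci pos : Int) (xs : List Int)
    (p0 : Int) (rest : List Int)
    (h : (occPos v pos xs).filter (fun p => !(PySem.Set.contains R (ci, p))) = p0 :: rest) :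
    eraseF v (keepP R ci pos xs) = keepP (PySem.Set.add R (ci, p0)) ci pos xs := by
  induction xs generalizing pos p0 rest with
  | nil => simp [occPos] at h
  | cons x xs ih =>
    by_cases hx : x = v <;> by_cases hr : PySem.Set.contains R (ci, pos) = true
    · -- x = v, position pos already removed
      have hrm : ((ci, pos) : Int × Int) ∈ R := (contains_iff_mem R (ci, pos)).1 hr
      rw [occPos, if_pos hx, List.filter_cons_of_neg (by simp [hrm])] at h
      have hc : PySem.Set.contains (PySem.Set.add R (ci, p0)) (ci, pos) = true := by
        rw [contains_add, hr]; rfl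
      simp only [keepP, if_pos hr, if_pos hc]
      exact ih (pos + 1) p0 rest h
    · -- x = v, pos survives: it is the removed occurrence
      have hrf : PySem.Set.contains R (ci, pos) = false := by simpa using hr
      have hnm : ((ci, pos) : Int × Int) ∉ R := fun hm => by
        rw [(contains_iff_mem R (ci, pos)).2 hm] at hrf; cases hrf
      rw [occPos, if_pos hx, List.filter_cons_of_pos (by simp [hnm])] at h
      rcases List.cons.injEq .. ▸ h with ⟨rfl, -⟩
      have hc : PySem.Set.contains (PySem.Set.add R (ci, pos)) (ci, pos) = true := by
        rw [contains_add]; simp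
      simp only [keepP, if_neg hr, if_pos hc, hx, eraseF]
      rw [keepP_add_out R (ci, pos) ci (pos + 1) xs (Or.inr (by simp))]
      simp
    · -- x ≠ v, position pos removed
      rw [occPos, if_neg hx] at h
      have hc : PySem.Set.contains (PySem.Set.add R (ci, p0)) (ci, pos) = true := by
        rw [contains_add, hr]; rfl
      simp only [keepP, if_pos hr, if_pos hc]
      exact ih (pos + 1) p0 rest h
    · -- x ≠ v, pos survives and is not the removed occurrence
      rw [occPos, if_neg hx] at h
      have hp0 : pos + 1 ≤ p0 := by
        have hm : p0 ∈ occPos v (pos + 1) xs :=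
          List.mem_of_mem_filter (h ▸ List.mem_cons_self)
        exact occPos_ge v (pos + 1) p0 xs hm
      have hrf : PySem.Set.contains R (ci, pos) = false := by simpa using hr
      have hc : PySem.Set.contains (PySem.Set.add R (ci, p0)) (ci, pos) = false := by
        rw [contains_add, hrf]
        simp [beq_eq_false_iff_ne]
        omega
      have hcn : ¬ (PySem.Set.contains (PySem.Set.add R (ci, p0)) (ci, pos) = true) := by
        rw [hc]; simp
      simp only [keepP, if_neg hr, if_neg hcn, eraseF, if_neg hx]
      rw [ih (pos + 1) p0 rest h]

theorem not_mem_keepP_of_filter_nil (R : List (Int × Int)) (v ci : Int) (c : List Int)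
    (hb : (occPos v 0 c).filter (fun p => !(PySem.Set.contains R (ci, p))) = []) :
    v ∉ keepP R ci 0 c := by
  rw [mem_keepP]
  rintro ⟨p, hp, hpr⟩
  have hm : p ∈ (occPos v 0 c).filter (fun p => !(PySem.Set.contains R (ci, p))) :=
    List.mem_filter.2 ⟨hp, by simp [PySem.Set.contains, hpr]⟩
  rw [hb] at hm
  cases hm

-- the inner loop of A on the survivor clusters: nothing found
theorem innerA_none (v : Int) (R : List (Int × Int)) (ci : Int) (cs : List (List Int))
    (h : remOcc v R ci cs = []) :
    innerA v ci (mapKeep R ci cs) = (none, mapKeep R ci cs) := by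
  induction cs generalizing ci with
  | nil => simp [innerA, mapKeep]
  | cons c cs ih =>
    simp only [remOcc, occAll, List.filter_append, List.filter_map, Function.comp_def,
      List.append_eq_nil_iff, List.map_eq_nil_iff] at h
    obtain ⟨h1, h2⟩ := h
    have hv : v ∉ keepP R ci 0 c := not_mem_keepP_of_filter_nil R v ci c h1
    have hrec := ih (ci + 1) (by rw [remOcc]; exact h2)
    simp only [mapKeep, innerA, if_neg hv, hrec]

-- the inner loop of A on the survivor clusters: found, removes the head occurrence
theorem innerA_some (v : Int) (R : List (Int × Int)) (ci : Int) (cs : List (List Int))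
    (c0 p0 : Int) (rest : List (Int × Int))
    (h : remOcc v R ci cs = (c0, p0) :: rest) :
    innerA v ci (mapKeep R ci cs) = (some c0, mapKeep (PySem.Set.add R (c0, p0)) ci cs) := by
  induction cs generalizing ci rest with
  | nil => simp [remOcc, occAll] at h
  | cons c cs ih =>
    simp only [remOcc, occAll, List.filter_append, List.filter_map, Function.comp_def] at h
    cases hb : (occPos v 0 c).filter (fun p => !(PySem.Set.contains R (ci, p))) with
    | nil =>
      rw [hb] at h
      simp only [List.map_nil, List.nil_append] at h
      have hv : v ∉ keepP R ci 0 c := not_mem_keepP_of_filter_nil R v ci c hb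
      have hge : ci + 1 ≤ c0 := by
        have hm : ((c0, p0) : Int × Int) ∈ occAll v (ci + 1) cs :=
          List.mem_of_mem_filter (h ▸ List.mem_cons_self)
        exact occAll_fst_ge v (ci + 1) cs (c0, p0) hm
      have hrec := ih (ci + 1) rest (by rw [remOcc]; exact h)
      simp only [mapKeep, innerA, if_neg hv, hrec]
      rw [keepP_add_ne R (c0, p0) ci 0 c (by simp; omega)]
    | cons q0 qrest =>
      rw [hb] at h
      simp only [List.map_cons, List.cons_append, List.cons.injEq, Prod.mk.injEq] at h
      obtain ⟨⟨rfl, rfl⟩, -⟩ := h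
      have hq0 : q0 ∈ (occPos v 0 c).filter (fun p => !(PySem.Set.contains R (ci, p))) := by
        rw [hb]; exact List.mem_cons_self
      have hv : v ∈ keepP R ci 0 c := by
        rw [mem_keepP]
        rcases List.mem_filter.1 hq0 with ⟨hm, hpr⟩
        exact ⟨q0, hm, by simpa [PySem.Set.contains] using hpr⟩
      simp only [mapKeep, innerA, if_pos hv]
      rw [pyPopFirst_eq_eraseF, eraseF_keepP R v ci 0 c q0 qrest hb,
        mapKeep_add_lt R (ci, q0) (ci + 1) cs (by simp)]

-- building the occurrence index: one cluster
theorem build_inner (c : List Int) (s ci : Int) (d : PySem.Dict Int (List (Int × Int))) (v : Int) :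
    ((PySem.List.enumerate c s).foldl
        (fun occ q => occ.modify q.2 [] (fun l => l ++ [(ci, q.1)])) d).getD v []
      = d.getD v [] ++ (occPos v s c).map (fun p => (ci, p)) := by
  induction c generalizing s d with
  | nil => simp [PySem.List.enumerate_nil, occPos]
  | cons x c ih =>
    rw [PySem.List.enumerate_cons, List.foldl_cons, ih, PySem.Dict.getD_modify]
    by_cases hx : x = v
    · subst hx
      simp [occPos]
    · rw [if_neg (fun h => hx h.symm)]
      simp [occPos, hx]

-- building the occurrence index: the whole chromosome
theorem build_outer (cs : List (List Int)) (ci : Int) (d : PySem.Dict Int (List (Int × Int))) (v : Int) :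
    ((PySem.List.enumerate cs ci).foldl
        (fun occ p => (PySem.List.enumerate p.2 0).foldl
          (fun occ q => occ.modify q.2 [] (fun l => l ++ [(p.1, q.1)])) occ) d).getD v []
      = d.getD v [] ++ occAll v ci cs := by
  induction cs generalizing ci d with
  | nil => simp [PySem.List.enumerate_nil, occAll]
  | cons c cs ih =>
    rw [PySem.List.enumerate_cons, List.foldl_cons, ih, build_inner, occAll,
      List.append_assoc]

-- one-step agreement of the two main loops, and the invariant's preservation
theorem main_loop (chrom : List (List Int)) (omnis : List Int)
    (occ : PySem.Dict Int (List (Int × Int))) (R : List (Int × Int)) (origs : List (Int × Int))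
    (hinv : ∀ v, occ.getD v [] = remOcc v R 0 chrom) :
    omnis.foldl
      (fun (st : List (List Int) × List (Int × Int)) nmod =>
        match innerA nmod 0 st.1 with
        | (some idx, aux) => (aux, st.2 ++ [(nmod, idx)])
        | (none, aux) => (aux, st.2))
      (mapKeep R 0 chrom, origs)
    = (mapKeep (omnis.foldl
        (fun (st : PySem.Dict Int (List (Int × Int)) × PySem.Set (Int × Int) × List (Int × Int)) nmod =>
          match st.1.get? nmod with
          | some ((ci, pos) :: rest) =>
              (st.1.insert nmod rest, PySem.Set.add st.2.1 (ci, pos), st.2.2 ++ [(nmod, ci)])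
          | _ => st)
        (occ, R, origs)).2.1 0 chrom,
       (omnis.foldl
        (fun (st : PySem.Dict Int (List (Int × Int)) × PySem.Set (Int × Int) × List (Int × Int)) nmod =>
          match st.1.get? nmod with
          | some ((ci, pos) :: rest) =>
              (st.1.insert nmod rest, PySem.Set.add st.2.1 (ci, pos), st.2.2 ++ [(nmod, ci)])
          | _ => st)
        (occ, R, origs)).2.2) := by
  induction omnis generalizing occ R origs with
  | nil => rfl
  | cons nmod omnis ih =>
    rw [List.foldl_cons, List.foldl_cons]
    cases h : remOcc nmod R 0 chrom with
    | nil =>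
      have hA := innerA_none nmod R 0 chrom h
      have hgd : occ.getD nmod [] = [] := by rw [hinv, h]
      have hB : (match occ.get? nmod with
          | some ((ci, pos) :: rest) =>
              (occ.insert nmod rest, PySem.Set.add R (ci, pos), origs ++ [(nmod, ci)])
          | _ => ((occ, R, origs) : PySem.Dict Int (List (Int × Int)) × PySem.Set (Int × Int) × List (Int × Int)))
          = (occ, R, origs) := by
        rw [PySem.Dict.getD_eq_get?_getD] at hgd
        cases hg : occ.get? nmod with
        | none => rfl
        | some l =>
          rw [hg] at hgd
          simp at hgd
          subst hgd
          rfl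
      rw [hA, hB]
      exact ih occ R origs hinv
    | cons a tl =>
      rcases a with ⟨ci, pos⟩
      have hA := innerA_some nmod R 0 chrom ci pos tl h
      have hgd : occ.getD nmod [] = (ci, pos) :: tl := by rw [hinv, h]
      have hg : occ.get? nmod = some ((ci, pos) :: tl) := by
        rw [PySem.Dict.getD_eq_get?_getD] at hgd
        cases hg : occ.get? nmod with
        | none => rw [hg] at hgd; cases hgd
        | some l => rw [hg] at hgd; simp at hgd; rw [hgd]
      have hmem : ((ci, pos) : Int × Int) ∈ occAll nmod 0 chrom := by
        have : ((ci, pos) : Int × Int) ∈ remOcc nmod R 0 chrom := by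
          rw [h]; exact List.mem_cons_self
        exact List.mem_of_mem_filter this
      have hinv' : ∀ v, (occ.insert nmod tl).getD v [] =
          remOcc v (PySem.Set.add R (ci, pos)) 0 chrom := by
        intro v
        rw [PySem.Dict.getD_insert]
        by_cases hv : v = nmod
        · subst hv
          rw [if_pos rfl, remOcc]
          have hpred : ∀ p : Int × Int, (!(PySem.Set.contains (PySem.Set.add R (ci, pos)) p)) =
              ((!(PySem.Set.contains R p)) && !(p == (ci, pos))) := by
            intro p
            rw [contains_add]
            cases PySem.Set.contains R p <;> cases hpa : (p == ((ci, pos) : Int × Int)) <;> simp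
          rw [List.filter_congr (fun p _ => hpred p)]
          exact (filter_add_head (occAll v 0 chrom) (fun p => !(PySem.Set.contains R p)) (ci, pos) tl
            (occAll_nodup v 0 chrom) (by rw [← remOcc]; exact h)).symm
        · rw [if_neg hv, hinv, remOcc, remOcc]
          refine List.filter_congr (fun p hp => ?_)
          have hne : p ≠ (ci, pos) := fun he =>
            hv (occAll_val v nmod 0 chrom p hp (he ▸ hmem))
          rw [contains_add]
          simp [beq_eq_false_iff_ne, hne]
      rw [hA, hg]
      exact ih (occ.insert nmod tl) (PySem.Set.add R (ci, pos)) (origs ++ [(nmod, ci)]) hinv'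

-- dropping the empty clusters
def dropEmpt : List (List Int) → List (List Int)
  | [] => []
  | c :: cs => if c = [] then dropEmpt cs else c :: dropEmpt cs

theorem remempt_acc (cs : List (List Int)) (acc : List (List Int)) :
    cs.foldl (fun aux clus => if clus.length = 0 then aux else aux ++ [clus]) acc
      = acc ++ dropEmpt cs := by
  induction cs generalizing acc with
  | nil => simp [dropEmpt]
  | cons c cs ih =>
    rw [List.foldl_cons]
    by_cases hc : c = []
    · subst hc; simpa [dropEmpt] using ih acc
    · have hl : ¬ c.length = 0 := by simpa [List.length_eq_zero_iff] using hc
      rw [if_neg hl, ih, dropEmpt]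
      simp [hc]

theorem rebuild_inner (R : List (Int × Int)) (ci : Int) (c : List Int) (s : Int) :
    (((PySem.List.enumerate c s).filter
        (fun q => !(PySem.Set.contains R (ci, q.1)))).map (·.2)) = keepP R ci s c := by
  induction c generalizing s with
  | nil => simp [PySem.List.enumerate_nil, keepP]
  | cons x c ih =>
    rw [PySem.List.enumerate_cons]
    by_cases hr : PySem.Set.contains R (ci, s) = true
    · have hrm : ((ci, s) : Int × Int) ∈ R := (contains_iff_mem R (ci, s)).1 hr
      rw [List.filter_cons_of_neg (by simp [hrm])]
      rw [keepP, if_pos hr]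
      exact ih (s + 1)
    · have hrf : PySem.Set.contains R (ci, s) = false := by simpa using hr
      have hnm : ((ci, s) : Int × Int) ∉ R := fun hm => by
        rw [(contains_iff_mem R (ci, s)).2 hm] at hrf; cases hrf
      rw [List.filter_cons_of_pos (by simp [hnm])]
      rw [keepP, if_neg hr, List.map_cons]
      rw [ih (s + 1)]

theorem rebuild_outer (R : List (Int × Int)) (cs : List (List Int)) (ci : Int)
    (acc : List (List Int)) :
    (PySem.List.enumerate cs ci).foldl (fun aux2 p =>
        let rest := ((PySem.List.enumerate p.2 0).filter
            (fun q => !(PySem.Set.contains R (p.1, q.1)))).map (·.2)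
        if rest = [] then aux2 else aux2 ++ [rest]) acc
      = acc ++ dropEmpt (mapKeep R ci cs) := by
  induction cs generalizing ci acc with
  | nil => simp [PySem.List.enumerate_nil, mapKeep, dropEmpt]
  | cons c cs ih =>
    rw [PySem.List.enumerate_cons, List.foldl_cons]
    show (PySem.List.enumerate cs (ci + 1)).foldl _
        (if ((PySem.List.enumerate c 0).filter
            (fun q => !(PySem.Set.contains R (ci, q.1)))).map (·.2) = [] then acc
         else acc ++ [((PySem.List.enumerate c 0).filter
            (fun q => !(PySem.Set.contains R (ci, q.1)))).map (·.2)])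
      = acc ++ dropEmpt (mapKeep R ci (c :: cs))
    rw [rebuild_inner R ci c 0]
    by_cases hk : keepP R ci 0 c = []
    · rw [if_pos hk, ih (ci + 1) acc, mapKeep, dropEmpt]
      rw [if_pos hk]
    · rw [if_neg hk, ih (ci + 1) (acc ++ [keepP R ci 0 c]), mapKeep, dropEmpt]
      rw [if_neg hk]
      simp

theorem remOcc_empty (v : Int) (ci : Int) (cs : List (List Int)) :
    remOcc v ([] : List (Int × Int)) ci cs = occAll v ci cs := by
  simp [remOcc, PySem.Set.contains]

-- ===== VERDICT (by name: the statement is the Claim_ definition above) =====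
theorem extract_omnis_spec : Claim_equal_extract_omnis := by
  unfold Claim_equal_extract_omnis
  intro omnis chrom _
  unfold Spec_extract_omnis extract_omnis extract_omnis_alt
  simp only []
  have hempty : (PySem.Set.empty : PySem.Set (Int × Int)) = ([] : List (Int × Int)) := rfl
  have hinit : ∀ v, ((PySem.List.enumerate chrom 0).foldl (fun occ p =>
      (PySem.List.enumerate p.2 0).foldl
        (fun occ q => occ.modify q.2 [] (fun l => l ++ [(p.1, q.1)])) occ)
      PySem.Dict.empty).getD v [] = remOcc v (PySem.Set.empty : PySem.Set (Int × Int)) 0 chrom := by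
    intro v
    rw [build_outer, PySem.Dict.getD_empty, hempty, remOcc_empty, List.nil_append]
  have hmain := main_loop chrom omnis _ (PySem.Set.empty : PySem.Set (Int × Int)) [] hinit
  rw [hempty, mapKeep_empty] at hmain
  rw [hmain]
  rw [rebuild_outer]
  rw [remempt, remempt_acc]
  simp
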